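-- pv_equiv track=rewrite | github.com/SveterCZE/advent-of-code-2021 | day12/day12.py | can_small_cave_be_visited
-- ===== SOURCE A (Python) =====
-- def can_small_cave_be_visited(current_journey, next_step):
--     small_letters_count = {}
--     for elem in current_journey:
--         if elem.islower() == True:
--             if elem not in small_letters_count:
--                 small_letters_count[elem] = 1
--             else:
--                 small_letters_count[elem] += 1
--     if next_step not in small_letters_count:
--         return True
--
--     for key, value in small_letters_count.items():
--         if value > 1:
--             return False
--     return True
-- ===== SOURCE B (Python) =====
-- def can_small_cave_be_visited(current_journey, next_step):
--     small = sorted(e for e in current_journey if e.islower())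
--     if next_step not in small:
--         return True
--     return all(a != b for a, b in zip(small, small[1:]))
-- ===== Notes on version B (the rewrite author's own statement) =====
-- stated objective: alternative
-- what changed: Replaces A's counting dict and second value-scan by sort-then-adjacent-scan duplicate detection: the small caves are sorted and a repeat visit is allowed iff no two neighbouring elements of the sorted list are equal.
import Mathlib
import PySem

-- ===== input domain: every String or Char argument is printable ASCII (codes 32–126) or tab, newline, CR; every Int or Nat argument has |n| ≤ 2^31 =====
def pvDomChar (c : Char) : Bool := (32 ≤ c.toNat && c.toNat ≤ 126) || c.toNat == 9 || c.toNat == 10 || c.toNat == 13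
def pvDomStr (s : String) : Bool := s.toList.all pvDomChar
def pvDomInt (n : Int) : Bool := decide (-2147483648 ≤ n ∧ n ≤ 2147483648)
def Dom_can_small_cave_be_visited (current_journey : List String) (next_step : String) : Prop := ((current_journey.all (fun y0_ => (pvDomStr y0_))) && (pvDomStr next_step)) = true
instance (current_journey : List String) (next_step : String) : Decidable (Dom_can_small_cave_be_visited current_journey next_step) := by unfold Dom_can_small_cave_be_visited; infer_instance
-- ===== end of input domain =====

-- B replaces A's counting dict and its second value-scan by sort-then-adjacent-scan duplicate
-- detection on the small caves: a different algorithm of similar cost.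


-- ===== PORT A =====
-- Python str.islower(), exact on the ASCII domain (cased ASCII chars are exactly the letters):
-- at least one lowercase letter and no uppercase letter.
def pyStrIslower (s : String) : Bool :=
  s.toList.any PySem.Chars.islower && s.toList.all (fun c => !PySem.Chars.isupper c)

def can_small_cave_be_visited (current_journey : List String) (next_step : String) : Bool :=
  let small_letters_count : PySem.Dict String Int :=
    current_journey.foldl (fun d elem =>
      if pyStrIslower elem then
        if d.contains elem = false then d.insert elem 1
        else d.insert elem ((d.get? elem).getD 0 + 1)
      else d) PySem.Dict.empty
  if small_letters_count.contains next_step = false then true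
  else if small_letters_count.items.any (fun kv => decide (kv.2 > 1)) then false
  else true

-- ===== PORT B =====
def can_small_cave_be_visited_alt (current_journey : List String) (next_step : String) : Bool :=
  let small := PySem.List.sorted (current_journey.filter (fun e => pyStrIslower e)) (fun x => x) false
  if small.contains next_step = false then true
  else (small.zip small.tail).all (fun p => p.1 != p.2)

-- ===== PRECONDITION & SPEC =====
def Spec_can_small_cave_be_visited (current_journey : List String) (next_step : String) (out : Bool) : Prop := out = can_small_cave_be_visited_alt current_journey next_step
instance (current_journey : List String) (next_step : String) (out : Bool) : Decidable (Spec_can_small_cave_be_visited current_journey next_step out) := by unfold Spec_can_small_cave_be_visited; infer_instance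

-- ===== CLAIM (what is proved, stated in full; the proofs are below) =====
def Claim_equal_can_small_cave_be_visited : Prop := ∀ (current_journey : List String) (next_step : String), Dom_can_small_cave_be_visited current_journey next_step → Spec_can_small_cave_be_visited current_journey next_step (can_small_cave_be_visited current_journey next_step)

-- ===== LEMMAS AND PROOFS =====

-- A's counting loop is Counter(small) where small = the lowercase elements of the journey.
theorem fold_eq_counter (current_journey : List String) :
    current_journey.foldl (fun d elem =>
      if pyStrIslower elem then
        if d.contains elem = false then d.insert elem 1
        else d.insert elem ((d.get? elem).getD 0 + 1)
      else d) PySem.Dict.empty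
    = PySem.Dict.counter (current_journey.filter (fun e => pyStrIslower e)) := by
  rw [PySem.List.foldl_congr_mem (g := fun d elem =>
        if pyStrIslower elem = true then d.insert elem (d.getD elem 0 + 1) else d)]
  · rw [PySem.List.foldl_ite_eq_foldl_filter (p := fun e => pyStrIslower e = true)]
    rw [PySem.Dict.foldl_insert_getD_add_one_eq_counter]
    simp
  · intro d x _
    by_cases h : pyStrIslower x = true
    · simp only [h, if_pos]
      by_cases hc : d.contains x = true
      · simp [hc, PySem.Dict.getD_eq_get?_getD]
      · have hc' : d.contains x = false := by simpa using hc
        simp [hc', PySem.Dict.getD_of_not_contains d (0 : Int) hc']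
    · simp [h]

-- the value-scan of A finds a count > 1 iff the small list has a duplicate
theorem counter_scan_eq (xs : List String) :
    ((PySem.Dict.counter xs).items.any (fun kv => decide (kv.2 > 1))) = !decide xs.Nodup := by
  rw [PySem.Dict.items_counter]
  by_cases hnd : xs.Nodup
  · simp only [hnd, decide_true, Bool.not_true]
    rw [List.any_eq_false]
    intro kv hkv
    obtain ⟨k, hk, rfl⟩ := List.mem_map.mp hkv
    have := (List.nodup_iff_count_le_one.mp hnd) k
    simp; omega
  · simp only [hnd, decide_false, Bool.not_false]
    rw [List.any_eq_true]
    rw [List.nodup_iff_count_le_one] at hnd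
    push Not at hnd
    obtain ⟨a, ha⟩ := hnd
    have hmem : a ∈ xs := by
      by_contra hn
      simp [List.count_eq_zero_of_not_mem hn] at ha
    exact ⟨(a, (xs.count a : Int)), List.mem_map_of_mem ((PySem.Set.mem_ofList xs a).mpr hmem),
      by simp; exact_mod_cast ha⟩

-- on a ≤-sorted list, adjacent elements being pairwise distinct is exactly Nodup
theorem zip_all_ne_eq_nodup (l : List String) (h : l.Pairwise (· ≤ ·)) :
    ((l.zip l.tail).all (fun p => p.1 != p.2)) = decide l.Nodup := by
  induction l with
  | nil => simp
  | cons a t ih =>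
    cases t with
    | nil => simp
    | cons b u =>
      have hpair := List.pairwise_cons.mp h
      have ih' := ih hpair.2
      simp only [List.zip, List.tail_cons] at ih'
      simp only [List.zip, List.tail_cons, List.zipWith_cons_cons, List.all_cons, ih']
      by_cases hab : a = b
      · subst hab
        simp [List.nodup_cons]
      · have hnotmem : a ∉ b :: u := by
          intro hm
          rcases List.mem_cons.mp hm with h1 | h2
          · exact hab h1
          · have hab' : a ≤ b := hpair.1 b (List.mem_cons_self)
            have hba : b ≤ a := (List.pairwise_cons.mp hpair.2).1 a h2
            exact hab (le_antisymm hab' hba)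
        simp [List.nodup_cons, hnotmem, hab]

-- ===== VERDICT (by name: the statement is the Claim_ definition above) =====
theorem can_small_cave_be_visited_spec : Claim_equal_can_small_cave_be_visited := by
  intro current_journey next_step _
  unfold Spec_can_small_cave_be_visited can_small_cave_be_visited can_small_cave_be_visited_alt
  simp only [fold_eq_counter, PySem.Dict.contains_counter]
  set f := current_journey.filter (fun e => pyStrIslower e) with hf
  set s := PySem.List.sorted f (fun x => x) false with hs
  have hperm : s.Perm f := PySem.List.sorted_perm f (fun x => x) false
  have hcont : s.contains next_step = f.contains next_step := by
    simp [hperm.mem_iff]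
  have hnd : s.Nodup ↔ f.Nodup := hperm.nodup_iff
  rw [hcont]
  by_cases hc : f.contains next_step = false
  · rw [if_pos hc, if_pos hc]
  · rw [if_neg hc, if_neg hc, counter_scan_eq,
      zip_all_ne_eq_nodup s (by simpa using PySem.List.sorted_pairwise f (fun x => x))]
    by_cases h1 : f.Nodup
    · simp [h1, hnd.mpr h1]
    · simp only [h1, decide_false, Bool.not_false]
      have h2 : ¬ s.Nodup := fun hx => h1 (hnd.mp hx)
      simp [h2]
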